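-- pv_equiv track=rewrite | github.com/emredata/kamera-hareketi-algila | app.py | group_consecutive_frames
-- ===== SOURCE A (Python) =====
-- def group_consecutive_frames(frames, min_group_size=3):
--     if not frames:
--         return []
--
--     grouped = []
--     temp_group = [frames[0]]
--
--     for i in range(1, len(frames)):
--         if frames[i] == frames[i-1] + 1:
--             temp_group.append(frames[i])
--         else:
--             if len(temp_group) >= min_group_size:
--                 grouped.extend(temp_group)
--             temp_group = [frames[i]]
--
--     if len(temp_group) >= min_group_size:
--         grouped.extend(temp_group)
--
--     return grouped
-- ===== SOURCE B (Python) =====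
-- def group_consecutive_frames(frames, min_group_size=3):
--     # Label-count-filter: tag each frame with its run id, count run sizes,
--     # then keep frames whose run is big enough.
--     labels = []
--     rid = -1
--     prev = None
--     for f in frames:
--         if prev is None or f != prev + 1:
--             rid += 1
--         labels.append(rid)
--         prev = f
--     counts = {}
--     for r in labels:
--         counts[r] = counts.get(r, 0) + 1
--     return [f for f, r in zip(frames, labels) if counts[r] >= min_group_size]
-- ===== Notes on version B (the rewrite author's own statement) =====
-- stated objective: alternative
-- what changed: Replaces A's single-pass flush-on-break state machine with a three-stage label/count/filter pipeline: tag each frame with a run id, count run sizes in a dict, then filter the original list by its run's count; no run list is ever built or flushed.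
import Mathlib
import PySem

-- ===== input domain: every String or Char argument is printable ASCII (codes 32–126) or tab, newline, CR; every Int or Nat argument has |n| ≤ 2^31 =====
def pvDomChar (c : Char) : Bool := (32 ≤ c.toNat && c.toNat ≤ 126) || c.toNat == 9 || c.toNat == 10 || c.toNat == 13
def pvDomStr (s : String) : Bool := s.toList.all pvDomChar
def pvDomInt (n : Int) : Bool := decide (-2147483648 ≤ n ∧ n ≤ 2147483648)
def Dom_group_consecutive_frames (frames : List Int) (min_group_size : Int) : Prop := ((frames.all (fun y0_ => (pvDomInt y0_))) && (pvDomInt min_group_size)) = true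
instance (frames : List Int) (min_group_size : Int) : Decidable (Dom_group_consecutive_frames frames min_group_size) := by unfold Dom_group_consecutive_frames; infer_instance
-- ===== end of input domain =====

-- B replaces A's flush-on-break state machine with a label/count/filter pipeline:
-- tag frames with run ids, count run sizes in a dict, filter by the count;
-- same return value, alternative decomposition (no speed claim).


-- ===== PORT A =====
-- A's for-loop over i in range(1, len(frames)) as structural recursion on the tail,
-- carrying prev = frames[i-1] and the state (grouped, temp_group).
def aLoop (m : Int) (prev : Int) (grouped temp : List Int) : List Int → List Int
  | [] => if m ≤ (temp.length : Int) then grouped ++ temp else grouped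
  | x :: xs =>
    if x = prev + 1 then aLoop m x grouped (temp ++ [x]) xs
    else if m ≤ (temp.length : Int) then aLoop m x (grouped ++ temp) [x] xs
    else aLoop m x grouped [x] xs

def group_consecutive_frames (frames : List Int) (min_group_size : Int) : List Int :=
  match frames with
  | [] => []
  | f :: rest => aLoop min_group_size f [] [f] rest

-- ===== PORT B =====
-- B's first loop: build the run-id label list, carrying prev (Option) and rid.
-- Python's short-circuit 'prev is None or f != prev + 1': when prev is none the
-- second disjunct is never evaluated, so the getD 0 default is never read.
def labelLoop : List Int → Option Int → Int → List Int
  | [], _, _ => []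
  | f :: fs, prev, rid =>
    let rid' := if prev = none ∨ f ≠ prev.getD 0 + 1 then rid + 1 else rid
    rid' :: labelLoop fs (some f) rid'

def group_consecutive_frames_alt (frames : List Int) (min_group_size : Int) : List Int :=
  let labels := labelLoop frames none (-1)
  -- counts[r] = counts.get(r, 0) + 1 over labels
  let counts : PySem.Dict Int Int :=
    labels.foldl (fun d r => d.insert r (d.getD r 0 + 1)) PySem.Dict.empty
  -- [f for f, r in zip(frames, labels) if counts[r] >= min_group_size]
  ((frames.zip labels).filter (fun p => min_group_size ≤ counts.getD p.2 0)).map Prod.fst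

-- ===== PRECONDITION & SPEC =====
def Spec_group_consecutive_frames (frames : List Int) (min_group_size : Int) (out : List Int) : Prop := out = group_consecutive_frames_alt frames min_group_size
instance (frames : List Int) (min_group_size : Int) (out : List Int) : Decidable (Spec_group_consecutive_frames frames min_group_size out) := by unfold Spec_group_consecutive_frames; infer_instance

-- ===== CLAIM (what is proved, stated in full; the proofs are below) =====
def Claim_equal_group_consecutive_frames : Prop := ∀ (frames : List Int) (min_group_size : Int), Dom_group_consecutive_frames frames min_group_size → Spec_group_consecutive_frames frames min_group_size (group_consecutive_frames frames min_group_size)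

-- ===== LEMMAS AND PROOFS =====

-- Canonical split of a list into its first maximal consecutive run and the rest.
def takeRun (prev : Int) : List Int → List Int × List Int
  | [] => ([], [])
  | y :: ys =>
    if y = prev + 1 then
      let p := takeRun y ys
      (y :: p.1, p.2)
    else ([], y :: ys)

theorem takeRun_snd_length (prev : Int) (xs : List Int) :
    (takeRun prev xs).2.length ≤ xs.length := by
  induction xs generalizing prev with
  | nil => simp [takeRun]
  | cons y ys ih =>
    simp only [takeRun]
    split
    · exact Nat.le_succ_of_le (ih y)
    · simp

theorem takeRun_append (x : Int) (xs : List Int) :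
    x :: xs = (x :: (takeRun x xs).1) ++ (takeRun x xs).2 := by
  induction xs generalizing x with
  | nil => simp [takeRun]
  | cons y ys ih =>
    by_cases hy : y = x + 1
    · subst hy
      have htr : takeRun x ((x + 1) :: ys) =
          ((x + 1) :: (takeRun (x + 1) ys).1, (takeRun (x + 1) ys).2) := by
        simp [takeRun]
      rw [htr]
      simpa using ih (x + 1)
    · simp [takeRun, hy]

-- Accumulator-free canonical form of the function's value.
def runSpec (m : Int) : List Int → List Int
  | [] => []
  | x :: xs =>
    let p := takeRun x xs
    (if m ≤ (((x :: p.1).length : Nat) : Int) then x :: p.1 else []) ++ runSpec m p.2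
termination_by xs => xs.length
decreasing_by exact Nat.lt_succ_of_le (takeRun_snd_length x xs)

-- ===== A = runSpec =====
theorem aLoop_eq (m : Int) :
    ∀ (n : Nat) (rest : List Int), rest.length ≤ n → ∀ (prev : Int) (grouped temp : List Int),
      aLoop m prev grouped temp rest =
        grouped ++
          (if m ≤ (((temp ++ (takeRun prev rest).1).length : Nat) : Int)
            then temp ++ (takeRun prev rest).1 else []) ++
          runSpec m (takeRun prev rest).2 := by
  intro n
  induction n with
  | zero =>
    intro rest h prev grouped temp
    have : rest = [] := List.eq_nil_of_length_eq_zero (Nat.le_zero.mp h)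
    subst this
    simp only [takeRun, runSpec, aLoop, List.append_nil]
    split_ifs <;> simp
  | succ n ih =>
    intro rest h prev grouped temp
    cases rest with
    | nil =>
      simp only [takeRun, runSpec, aLoop, List.append_nil]
      split_ifs <;> simp
    | cons x xs =>
      by_cases hx : x = prev + 1
      · have : aLoop m prev grouped temp (x :: xs) = aLoop m x grouped (temp ++ [x]) xs := by
          simp [aLoop, hx]
        rw [this, ih xs (Nat.le_of_succ_le_succ h) x grouped (temp ++ [x])]
        simp [takeRun, hx, List.append_assoc]
      · have htr : takeRun prev (x :: xs) = ([], x :: xs) := by simp [takeRun, hx]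
        rw [htr]
        have hrs : runSpec m (x :: xs) =
            (if m ≤ (((x :: (takeRun x xs).1).length : Nat) : Int)
              then x :: (takeRun x xs).1 else []) ++ runSpec m (takeRun x xs).2 := by
          rw [runSpec]
        by_cases hc : m ≤ ((temp.length : Nat) : Int)
        · have : aLoop m prev grouped temp (x :: xs) = aLoop m x (grouped ++ temp) [x] xs := by
            simp [aLoop, hx, hc]
          rw [this, ih xs (Nat.le_of_succ_le_succ h) x (grouped ++ temp) [x], hrs]
          simp [hc, List.append_assoc]
        · have : aLoop m prev grouped temp (x :: xs) = aLoop m x grouped [x] xs := by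
            simp [aLoop, hx, hc]
          rw [this, ih xs (Nat.le_of_succ_le_succ h) x grouped [x], hrs]
          simp [hc, List.append_assoc]

theorem a_eq_runSpec (frames : List Int) (m : Int) :
    group_consecutive_frames frames m = runSpec m frames := by
  cases frames with
  | nil => simp [group_consecutive_frames, runSpec]
  | cons f rest =>
    show aLoop m f [] [f] rest = _
    rw [aLoop_eq m rest.length rest le_rfl f [] [f], runSpec]
    simp

-- ===== B = runSpec =====

-- Labels of a suffix whose first element starts a fresh run with id L.
def labL (x : Int) (xs : List Int) (L : Int) : List Int := L :: labelLoop xs (some x) L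

theorem labelLoop_ge (xs : List Int) : ∀ (prev : Option Int) (rid l : Int),
    l ∈ labelLoop xs prev rid → rid ≤ l := by
  induction xs with
  | nil => intro prev rid l h; simp [labelLoop] at h
  | cons f fs ih =>
    intro prev rid l h
    simp only [labelLoop, List.mem_cons] at h
    rcases h with h | h
    · subst h; split_ifs <;> omega
    · have := ih (some f) _ l h
      revert this; split_ifs <;> intro this <;> omega

-- Run structure of the labels: the first maximal run is a constant block L,
-- the remainder restarts fresh at L + 1.
theorem labL_run (xs : List Int) : ∀ (x L : Int),
    labL x xs L =
      List.replicate (1 + (takeRun x xs).1.length) L ++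
        (match (takeRun x xs).2 with
          | [] => []
          | y :: ys => labL y ys (L + 1)) := by
  induction xs with
  | nil => intro x L; simp [labL, labelLoop, takeRun]
  | cons y ys ih =>
    intro x L
    by_cases hy : y = x + 1
    · subst hy
      have h1 : labL x ((x + 1) :: ys) L = L :: labL (x + 1) ys L := by
        simp [labL, labelLoop]
      rw [h1, ih (x + 1) L]
      have htr : takeRun x ((x + 1) :: ys) =
          ((x + 1) :: (takeRun (x + 1) ys).1, (takeRun (x + 1) ys).2) := by
        simp [takeRun]
      rw [htr]
      simp only [List.length_cons]
      rw [show 1 + ((takeRun (x + 1) ys).1.length + 1) =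
            (1 + (takeRun (x + 1) ys).1.length) + 1 from by omega]
      rw [List.replicate_succ, List.cons_append]
    · have h1 : labL x (y :: ys) L = L :: labL y ys (L + 1) := by
        simp [labL, labelLoop, hy]
      rw [h1]
      simp [takeRun, hy, List.replicate_succ]

theorem count_labL_self (x : Int) (xs : List Int) (L : Int) :
    (labL x xs L).count L = 1 + (takeRun x xs).1.length := by
  rw [labL_run]
  rw [List.count_append, List.count_replicate_self]
  have h0 : (match (takeRun x xs).2 with
      | [] => ([] : List Int)
      | y :: ys => labL y ys (L + 1)).count L = 0 := by
    cases hr : (takeRun x xs).2 with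
    | nil => simp
    | cons y ys =>
      apply List.count_eq_zero.mpr
      intro hm
      rcases List.mem_cons.mp hm with h | h
      · omega
      · have := labelLoop_ge ys (some y) (L + 1) L h
        omega
  omega

-- Main lemma: filtering a suffix zipped with its labels by 'count of label ≥ m'
-- (counts taken in any list agreeing with the suffix's labels on ids ≥ L)
-- yields the canonical runSpec value.
theorem filter_labels_eq (m : Int) :
    ∀ (n : Nat) (xs : List Int), xs.length ≤ n → ∀ (x L : Int) (labAll : List Int),
      (∀ l, L ≤ l → labAll.count l = (labL x xs L).count l) →
      (((x :: xs).zip (labL x xs L)).filter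
          (fun p => decide (m ≤ ((labAll.count p.2 : Nat) : Int)))).map Prod.fst =
        runSpec m (x :: xs) := by
  intro n
  induction n with
  | zero =>
    intro xs h x L labAll hc
    have : xs = [] := List.eq_nil_of_length_eq_zero (Nat.le_zero.mp h)
    subst this
    have hcL := hc L le_rfl
    rw [count_labL_self] at hcL
    simp only [takeRun] at hcL
    rw [runSpec]
    simp only [labL, labelLoop, takeRun, List.zip_cons_cons, List.zip_nil_right,
      List.filter, hcL]
    by_cases hm : m ≤ (1 : Int)
    · simp [hm, runSpec]
    · simp [hm, runSpec]
  | succ n ih =>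
    intro xs h x L labAll hc
    -- split off the first maximal run
    have hsplit : labL x xs L =
        List.replicate (1 + (takeRun x xs).1.length) L ++
          (match (takeRun x xs).2 with
            | [] => []
            | y :: ys => labL y ys (L + 1)) := labL_run xs x L
    have hxs : x :: xs = (x :: (takeRun x xs).1) ++ (takeRun x xs).2 :=
      takeRun_append x xs
    have hlen1 : (x :: (takeRun x xs).1).length = 1 + (takeRun x xs).1.length := by
      simp [Nat.add_comm]
    have hcount : labAll.count L = 1 + (takeRun x xs).1.length := by
      rw [hc L le_rfl, count_labL_self]
    -- zip splits across the equal-length blocks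
    rw [hsplit]
    conv_lhs => rw [show ((x :: xs) : List Int) = (x :: (takeRun x xs).1) ++ (takeRun x xs).2 from hxs]
    rw [List.zip_append (by simp [hlen1])]
    rw [List.filter_append, List.map_append]
    have hfirst :
        (((x :: (takeRun x xs).1).zip (List.replicate (1 + (takeRun x xs).1.length) L)).filter
            (fun p => decide (m ≤ ((labAll.count p.2 : Nat) : Int)))).map Prod.fst =
          (if m ≤ (((x :: (takeRun x xs).1).length : Nat) : Int) then x :: (takeRun x xs).1 else []) := by
      have hz : (x :: (takeRun x xs).1).zip (List.replicate (1 + (takeRun x xs).1.length) L) =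
          (x :: (takeRun x xs).1).map (fun a => (a, L)) := by
        rw [← hlen1]
        generalize (x :: (takeRun x xs).1) = bl
        induction bl with
        | nil => simp
        | cons b bs ihb => simp [List.replicate_succ, ihb]
      rw [hz, List.filter_map, List.map_map]
      by_cases hm : m ≤ (((x :: (takeRun x xs).1).length : Nat) : Int)
      · rw [if_pos hm]
        have hmc : m ≤ ((labAll.count L : Nat) : Int) := by
          rw [hcount]; rw [hlen1] at hm; exact_mod_cast hm
        simp [Function.comp_def, hmc]
      · rw [if_neg hm]
        have hmc : ¬ m ≤ ((labAll.count L : Nat) : Int) := by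
          rw [hcount]; rw [hlen1] at hm; exact_mod_cast hm
        simp [Function.comp_def, hmc]
    rw [hfirst]
    -- the remainder
    cases hr : (takeRun x xs).2 with
    | nil =>
      conv_rhs => rw [runSpec]
      rw [hr]
      rw [runSpec]
      simp
    | cons y ys =>
      have hlen2 : ys.length ≤ n := by
        have h1 := takeRun_snd_length x xs
        rw [hr] at h1
        simp at h1
        omega
      have hsplit2 : labL x xs L =
          List.replicate (1 + (takeRun x xs).1.length) L ++ labL y ys (L + 1) := by
        conv_lhs => rw [labL_run]
        rw [hr]
      have hc2 : ∀ l, L + 1 ≤ l → labAll.count l = (labL y ys (L + 1)).count l := by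
        intro l hl
        rw [hc l (by omega), hsplit2, List.count_append]
        have h0 : (List.replicate (1 + (takeRun x xs).1.length) L).count l = 0 := by
          refine List.count_eq_zero.mpr ?_
          intro hmem
          have := List.eq_of_mem_replicate hmem
          omega
        omega
      have hred : (match y :: ys with
          | [] => ([] : List Int)
          | y :: ys => labL y ys (L + 1)) = labL y ys (L + 1) := rfl
      rw [hred, ih ys hlen2 y (L + 1) labAll hc2]
      conv_rhs => rw [runSpec]
      rw [hr]

theorem b_eq_runSpec (frames : List Int) (m : Int) :
    group_consecutive_frames_alt frames m = runSpec m frames := by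
  cases frames with
  | nil => simp [group_consecutive_frames_alt, labelLoop, runSpec]
  | cons f rest =>
    simp only [group_consecutive_frames_alt]
    have hlab : labelLoop (f :: rest) none (-1) = labL f rest 0 := by
      simp [labelLoop, labL]
    rw [hlab]
    rw [PySem.Dict.foldl_insert_getD_add_one_eq_counter]
    have hgetD : ∀ (p : Int × Int),
        (decide (m ≤ (PySem.Dict.counter (labL f rest 0)).getD p.2 0)) =
        (decide (m ≤ (((labL f rest 0).count p.2 : Nat) : Int))) := by
      intro p
      rw [PySem.Dict.getD_counter]
    simp only [hgetD]
    exact filter_labels_eq m rest.length rest le_rfl f 0 (labL f rest 0) (fun _ _ => rfl)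

-- ===== VERDICT (by name: the statement is the Claim_ definition above) =====
theorem group_consecutive_frames_spec : Claim_equal_group_consecutive_frames := by
  intro frames m _
  unfold Spec_group_consecutive_frames
  rw [a_eq_runSpec, b_eq_runSpec]
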